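-- pv_equiv track=rewrite | github.com/davidebolo1993/TRiCoLOR | Scripts/PlotAlignment.py | modifier
-- ===== SOURCE A (Python) =====
-- def modifier(coordinates): #fast way to remove None and substitute with closest number in list
--
--
-- 	coordinates=[el+1 if el is not None else el for el in coordinates] #get true coordinates
-- 	start = next(ele for ele in coordinates if ele is not None)
--
-- 	for ind, ele in enumerate(coordinates):
--
-- 		if ele is None:
--
-- 			coordinates[ind] = start
--
-- 		else:
--
-- 			start = ele
--
-- 	return coordinates
-- ===== SOURCE B (Python) =====
-- def modifier(coordinates):
-- 	# Run-based rebuild: locate each non-None entry, emit its (value+1) repeated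
-- 	# over the following run of Nones; leading Nones take the first value.
-- 	n = len(coordinates)
-- 	lead = 0
-- 	while lead < n and coordinates[lead] is None:
-- 		lead += 1
-- 	out = [coordinates[lead] + 1] * lead  # raises IndexError when no non-None exists
-- 	i = lead
-- 	while i < n:
-- 		v = coordinates[i] + 1
-- 		j = i + 1
-- 		while j < n and coordinates[j] is None:
-- 			j += 1
-- 		out += [v] * (j - i)
-- 		i = j
-- 	return out
-- ===== Notes on version B (the rewrite author's own statement) =====
-- stated objective: alternative
-- what changed: Replaces A's elementwise map-then-mutate-in-place fill with a run-based rebuild: scan for each non-None entry and emit its value+1 repeated over the following run of Nones via list repetition.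
import Mathlib
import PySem

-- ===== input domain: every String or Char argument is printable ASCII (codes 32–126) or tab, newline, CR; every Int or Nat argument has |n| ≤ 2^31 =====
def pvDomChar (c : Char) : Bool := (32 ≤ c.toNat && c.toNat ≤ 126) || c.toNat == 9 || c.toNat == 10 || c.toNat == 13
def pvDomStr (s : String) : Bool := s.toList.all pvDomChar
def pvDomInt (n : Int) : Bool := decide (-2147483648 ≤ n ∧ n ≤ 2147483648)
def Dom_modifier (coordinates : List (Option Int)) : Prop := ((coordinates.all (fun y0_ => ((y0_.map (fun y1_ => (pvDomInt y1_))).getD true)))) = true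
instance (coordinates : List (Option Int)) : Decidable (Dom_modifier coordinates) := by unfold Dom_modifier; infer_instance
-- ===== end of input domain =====

-- B rebuilds the output run by run (non-None value + its trailing None-run, via list
-- repetition) instead of A's map-then-mutate-in-place elementwise fill; same O(n) cost.
-- Both programs raise on lists with no non-None element (A: StopIteration, B: IndexError);
-- Pre_ excludes exactly those.

-- ===== PORT A =====
-- next(ele for ele in coordinates if ele is not None): first non-None, none = StopIteration
def pvFirstSome : List (Option Int) → Option Int
  | [] => none
  | some v :: _ => some v
  | none :: rest => pvFirstSome rest

-- the for-loop: in-place write of either `start` (at a None) or the element, updating `start`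
def pvALoop (start : Int) : List (Option Int) → List Int
  | [] => []
  | none :: rest => start :: pvALoop start rest
  | some v :: rest => v :: pvALoop v rest

def modifier (coordinates : List (Option Int)) : List Int :=
  match pvFirstSome (coordinates.map (fun el => el.map (· + 1))) with
  | none => []          -- unreachable under Pre_: Python raises StopIteration
  | some start => pvALoop start (coordinates.map (fun el => el.map (· + 1)))

-- ===== PORT B =====
-- the inner `while j < n and coordinates[j] is None: j += 1` scans: length of leading None-run
def pvCountNones : List (Option Int) → Nat
  | [] => 0
  | none :: rest => pvCountNones rest + 1
  | some _ :: _ => 0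

-- the outer while-loop from position i (always a non-None entry), viewed as the suffix
def pvBLoop : List (Option Int) → List Int
  | [] => []
  | none :: _ => []     -- unreachable: Python would raise TypeError on None + 1
  | some v :: rest =>
      let cnt := pvCountNones rest
      List.replicate (cnt + 1) (v + 1) ++ pvBLoop (rest.drop cnt)
  termination_by l => l.length
  decreasing_by
    simp only [List.length_cons, List.length_drop]; omega

def modifier_alt (coordinates : List (Option Int)) : List Int :=
  match PySem.List.pyGet? coordinates ((pvCountNones coordinates : Nat) : Int) with
  | none => []          -- unreachable under Pre_: Python raises IndexError
  | some none => []     -- unreachable: coordinates[lead] is non-None by the scan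
  | some (some x) =>
      List.replicate (pvCountNones coordinates) (x + 1) ++
        pvBLoop (coordinates.drop (pvCountNones coordinates))

-- ===== PRECONDITION & SPEC =====
-- Pre_ excludes exactly the inputs with no non-None element, on which A raises StopIteration
-- (and B raises IndexError).
def Pre_modifier (coordinates : List (Option Int)) : Prop :=
  ∃ x ∈ coordinates, x.isSome = true
instance (coordinates : List (Option Int)) : Decidable (Pre_modifier coordinates) := by
  unfold Pre_modifier; infer_instance

def pvWitness_modifier : List (Option Int) := [none, some 3, none, some 7, none]

def Spec_modifier (coordinates : List (Option Int)) (out : List Int) : Prop := out = modifier_alt coordinates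
instance (coordinates : List (Option Int)) (out : List Int) : Decidable (Spec_modifier coordinates out) := by unfold Spec_modifier; infer_instance

-- ===== CLAIM (what is proved, stated in full; the proofs are below) =====
def Claim_equal_modifier : Prop := ∀ (coordinates : List (Option Int)), Dom_modifier coordinates → Pre_modifier coordinates → Spec_modifier coordinates (modifier coordinates)

-- ===== LEMMAS AND PROOFS =====

-- decomposition: a list with a non-None element is (leading Nones) ++ some x :: t
theorem pv_decomp (l : List (Option Int)) (h : ∃ x ∈ l, x.isSome = true) :
    ∃ x t, l = List.replicate (pvCountNones l) none ++ some x :: t := by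
  induction l with
  | nil => simp at h
  | cons hd tl ih =>
    cases hd with
    | some v => exact ⟨v, tl, by simp [pvCountNones]⟩
    | none =>
      obtain ⟨x, hx, hs⟩ := h
      simp at hx
      rcases hx with h1 | h2
      · subst h1; simp at hs
      · obtain ⟨x, t, ht⟩ := ih ⟨x, h2, hs⟩
        refine ⟨x, t, ?_⟩
        rw [pvCountNones, List.replicate_succ, List.cons_append]
        exact congrArg (List.cons none) ht

theorem pvCountNones_repl (c : Nat) (x : Int) (t : List (Option Int)) :
    pvCountNones (List.replicate c none ++ some x :: t) = c := by
  induction c with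
  | zero => simp [pvCountNones]
  | succ n ih => simp [List.replicate_succ, pvCountNones, ih]

theorem pvFirstSome_repl (c : Nat) (v : Int) (m : List (Option Int)) :
    pvFirstSome (List.replicate c none ++ some v :: m) = some v := by
  induction c with
  | zero => simp [pvFirstSome]
  | succ n ih => simp [List.replicate_succ, pvFirstSome, ih]

theorem pvALoop_repl (c : Nat) (s : Int) (m : List (Option Int)) :
    pvALoop s (List.replicate c none ++ m) = List.replicate c s ++ pvALoop s m := by
  induction c with
  | zero => simp
  | succ n ih => simp [List.replicate_succ, pvALoop, ih]

-- main bridge: A's fill over the incremented list equals B's run-based rebuild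
theorem pv_main (l : List (Option Int)) (x : Int) :
    pvALoop (x + 1) (l.map (fun el => el.map (· + 1))) =
      List.replicate (pvCountNones l) (x + 1) ++ pvBLoop (l.drop (pvCountNones l)) := by
  induction l generalizing x with
  | nil => simp [pvALoop, pvBLoop, pvCountNones]
  | cons hd tl ih =>
    cases hd with
    | none =>
      simp only [List.map_cons, Option.map_none, pvALoop, pvCountNones, List.drop_succ_cons,
        List.replicate_succ, List.cons_append]
      rw [ih x]
    | some v =>
      simp only [List.map_cons, Option.map_some, pvALoop, pvCountNones, List.drop_zero,
        List.replicate, List.nil_append]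
      rw [ih v, pvBLoop]
      simp [List.replicate_succ]

-- proof-side helpers
theorem pvGet_repl (c : Nat) (x : Int) (t : List (Option Int)) :
    PySem.List.pyGet? (List.replicate c none ++ some x :: t) ((c : Nat) : Int) = some (some x) := by
  rw [PySem.List.pyGet?_natCast]
  rw [List.getElem?_append_right (by simp)]
  simp

theorem pvDrop_repl (c : Nat) (x : Int) (t : List (Option Int)) :
    (List.replicate c none ++ some x :: t).drop c = some x :: t := by
  rw [List.drop_append_of_le_length (by simp)]
  simp

theorem pv_key (c : Nat) (x : Int) (t : List (Option Int)) :
    modifier (List.replicate c none ++ some x :: t) =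
      modifier_alt (List.replicate c none ++ some x :: t) := by
  unfold modifier modifier_alt
  rw [pvCountNones_repl, pvGet_repl, pvDrop_repl]
  simp only [List.map_append, List.map_replicate, Option.map_none, List.map_cons, Option.map_some]
  simp only [pvFirstSome_repl]
  rw [pvALoop_repl]
  have h1 : pvALoop (x + 1) (some (x + 1) :: t.map (fun el => el.map (· + 1)))
      = (x + 1) :: pvALoop (x + 1) (t.map (fun el => el.map (· + 1))) := rfl
  rw [h1, pv_main t x, pvBLoop]
  simp [List.replicate_succ]

-- ===== VERDICT (by name: the statement is the Claim_ definition above) =====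
theorem modifier_spec : Claim_equal_modifier := by
  intro coordinates _ hpre
  obtain ⟨x, t, hdec⟩ := pv_decomp coordinates hpre
  unfold Spec_modifier
  rw [hdec]
  exact pv_key _ x t
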